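-- pv_equiv track=rewrite | github.com/fbundle/sorts | transpiler/transpiler.py | find_start_of_block
-- ===== SOURCE A (Python) =====
-- Token = str
--
-- def find_start_of_block(line: list[Token]) -> int | None:
--     i = len(line)-1
--     while i >= 0:
--         if line[i] == "let":
--             return i
--         if line[i] == "match":
--             return i
--         if line[i] == "(":
--             return i
--         if line[i] == "lambda":
--             return i
--
--         i -= 1
--     return None
-- ===== SOURCE B (Python) =====
-- def find_start_of_block(line):
--     result = None
--     for i, tok in enumerate(line):
--         if tok in ("let", "match", "(", "lambda"):
--             result = i
--     return result
-- ===== Notes on version B (the rewrite author's own statement) =====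
-- stated objective: alternative
-- what changed: Replaced the backward while-loop with early return by a single forward enumerate pass that accumulates the last matching index and returns it after the loop.
import Mathlib
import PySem

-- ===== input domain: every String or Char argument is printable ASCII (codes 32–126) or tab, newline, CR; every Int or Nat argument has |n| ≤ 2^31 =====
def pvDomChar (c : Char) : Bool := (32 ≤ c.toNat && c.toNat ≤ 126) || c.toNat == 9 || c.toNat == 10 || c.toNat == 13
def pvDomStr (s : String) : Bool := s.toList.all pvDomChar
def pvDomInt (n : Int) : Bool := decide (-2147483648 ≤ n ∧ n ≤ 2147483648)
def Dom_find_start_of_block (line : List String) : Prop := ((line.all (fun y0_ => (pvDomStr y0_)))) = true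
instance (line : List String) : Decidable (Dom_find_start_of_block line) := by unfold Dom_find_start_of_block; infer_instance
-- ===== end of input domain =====

-- B replaces A's backward early-return scan by a forward accumulate-last-match pass; alternative decomposition, same result.
-- ===== PORT A =====
-- while loop 'i = len-1; while i >= 0: ...; i -= 1' as recursion on k = i+1; line[i] is always in range here,
-- so line[i]? = some t on every call and the none branch is unreachable (exact).
def find_start_of_block_go (line : List String) : Nat → Option Int
  | 0 => none
  | j+1 =>
    match getElem? line j with
    | none => none
    | some t =>
      if t == "let" then some (j : Int)
      else if t == "match" then some (j : Int)
      else if t == "(" then some (j : Int)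
      else if t == "lambda" then some (j : Int)
      else find_start_of_block_go line j

def find_start_of_block (line : List String) : Option Int :=
  find_start_of_block_go line line.length

-- ===== PORT B =====
def find_start_of_block_alt (line : List String) : Option Int :=
  (PySem.List.enumerate line).foldl
    (fun result p =>
      if p.2 == "let" || p.2 == "match" || p.2 == "(" || p.2 == "lambda" then some p.1 else result)
    none

-- ===== PRECONDITION & SPEC =====
def Spec_find_start_of_block (line : List String) (out : Option Int) : Prop := out = find_start_of_block_alt line
instance (line : List String) (out : Option Int) : Decidable (Spec_find_start_of_block line out) := by unfold Spec_find_start_of_block; infer_instance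

-- ===== CLAIM (what is proved, stated in full; the proofs are below) =====
def Claim_equal_find_start_of_block : Prop := ∀ (line : List String), Dom_find_start_of_block line → Spec_find_start_of_block line (find_start_of_block line)

-- ===== LEMMAS AND PROOFS =====

def pvStep (result : Option Int) (p : Int × String) : Option Int :=
  if p.2 == "let" || p.2 == "match" || p.2 == "(" || p.2 == "lambda" then some p.1 else result

theorem alt_eq_foldl (line : List String) :
    find_start_of_block_alt line = (PySem.List.enumerate line).foldl pvStep none := by
  rfl

theorem go_eq_take (line : List String) (k : Nat) (hk : k ≤ line.length) :
    find_start_of_block_go line k = (PySem.List.enumerate (line.take k)).foldl pvStep none := by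
  induction k with
  | zero => rfl
  | succ j ih =>
    have hj : j < line.length := hk
    obtain ⟨t, ht⟩ : ∃ t, getElem? line j = some t := ⟨_, List.getElem?_eq_getElem hj⟩
    have htake : line.take (j+1) = line.take j ++ [t] := by
      rw [List.take_add_one, ht]; rfl
    have hlen : (line.take j).length = j := List.length_take_of_le (Nat.le_of_lt hj)
    rw [htake, PySem.List.enumerate_append, List.foldl_append, hlen]
    simp only [find_start_of_block_go, ht, ih (Nat.le_of_lt hj),
      PySem.List.enumerate, List.foldl_cons, List.foldl_nil, pvStep]
    by_cases h1 : t = "let"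
    · simp [h1]
    by_cases h2 : t = "match"
    · simp [h2]
    by_cases h3 : t = "("
    · simp [h3]
    by_cases h4 : t = "lambda"
    · simp [h4]
    simp [h1, h2, h3, h4]

theorem eq_all (line : List String) : find_start_of_block line = find_start_of_block_alt line := by
  rw [find_start_of_block, go_eq_take line line.length (Nat.le_refl _), List.take_length,
    alt_eq_foldl]

-- ===== VERDICT (by name: the statement is the Claim_ definition above) =====
theorem find_start_of_block_spec : Claim_equal_find_start_of_block := by
  intro line _
  exact eq_all line
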